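-- pv_equiv track=rewrite | github.com/MathematicGuy/PythonJourney | Laboratory/ListComprehensions.py | EvenNumber
-- ===== SOURCE A (Python) =====
-- def EvenNumber(num):
--     ''' List comprehension '''
--     a = [
--         x ** 2  # Expression
--         for x  # Variable name
--         in range(num)  # in iterable
--         if x % 2 == 0  # if condition
--     ]
--     return a
-- ===== SOURCE B (Python) =====
-- def EvenNumber(num):
--     ''' Direct indexing of the even numbers: the k-th even below num is 2k '''
--     return [4 * k * k for k in range((num + 1) // 2)]
-- ===== Notes on version B (the rewrite author's own statement) =====
-- stated objective: alternative
-- what changed: B drops A's parity filter: instead of scanning all of range(num) and testing each x for evenness, it computes the count of evens below num in closed form and emits the square of the k-th even number directly for each index k.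
import Mathlib
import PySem

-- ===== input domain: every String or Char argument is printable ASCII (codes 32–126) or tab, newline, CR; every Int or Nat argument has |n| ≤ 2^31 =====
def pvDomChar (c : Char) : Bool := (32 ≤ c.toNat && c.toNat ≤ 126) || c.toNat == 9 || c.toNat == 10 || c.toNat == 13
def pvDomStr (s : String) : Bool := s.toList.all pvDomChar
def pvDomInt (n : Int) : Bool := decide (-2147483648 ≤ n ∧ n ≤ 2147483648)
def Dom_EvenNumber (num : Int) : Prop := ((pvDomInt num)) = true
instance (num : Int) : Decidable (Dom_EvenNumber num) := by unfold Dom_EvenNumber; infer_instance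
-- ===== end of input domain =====

-- B counts the evens below num closed-form ((num+1)//2) and emits 4*k*k per index,
-- dropping A's scan over range(num) with its parity filter (same cost class, different decomposition).
-- ===== PORT A =====
def EvenNumber (num : Int) : List Int :=
  (PySem.List.pyRange 0 num 1).foldl
    (fun a x => if PySem.Int.mod x 2 = 0 then a ++ [x ^ 2] else a) []

-- ===== PORT B =====
def EvenNumber_alt (num : Int) : List Int :=
  (PySem.List.pyRange 0 (PySem.Int.floordiv (num + 1) 2) 1).map (fun k => 4 * k * k)

-- ===== PRECONDITION & SPEC =====
def Spec_EvenNumber (num : Int) (out : List Int) : Prop := out = EvenNumber_alt num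
instance (num : Int) (out : List Int) : Decidable (Spec_EvenNumber num out) := by unfold Spec_EvenNumber; infer_instance

-- ===== CLAIM (what is proved, stated in full; the proofs are below) =====
def Claim_equal_EvenNumber : Prop := ∀ (num : Int), Dom_EvenNumber num → Spec_EvenNumber num (EvenNumber num)

-- ===== LEMMAS AND PROOFS =====

theorem EvenNumber_key (n : Nat) : EvenNumber (n : Int) = EvenNumber_alt (n : Int) := by
  induction n with
  | zero => decide
  | succ n ih =>
    have hA : EvenNumber ((n+1 : Nat) : Int) =
        (if PySem.Int.mod (n : Int) 2 = 0 then EvenNumber n ++ [(n:Int) ^ 2] else EvenNumber n) := by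
      unfold EvenNumber
      push_cast
      rw [PySem.List.pyRange_one_succ_right (by positivity), List.foldl_append]
      simp only [List.foldl]
    have hb : ∀ m : Nat, PySem.Int.floordiv ((m:Int) + 1) 2 = (((m+1)/2 : Nat) : Int) := by
      intro m
      have := PySem.Int.floordiv_natCast (m+1) 2
      push_cast at this ⊢; omega
    rw [hA]
    by_cases he : PySem.Int.mod (n : Int) 2 = 0
    · rw [if_pos he, ih]
      rw [PySem.Int.mod_eq_zero_iff_dvd] at he
      have hev : n % 2 = 0 := by
        have h2 : (2:Nat) ∣ n := by exact_mod_cast he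
        omega
      obtain ⟨m, rfl⟩ : ∃ m, n = 2*m := ⟨n/2, by omega⟩
      unfold EvenNumber_alt
      rw [hb (2*m), hb (2*m+1)]
      have h1 : (2*m+1)/2 = m := by omega
      have h2 : (2*m+1+1)/2 = m + 1 := by omega
      rw [h1, h2]
      push_cast
      rw [PySem.List.pyRange_one_succ_right (by positivity), List.map_append]
      congr 1
      simp only [List.map_cons, List.map_nil, List.cons.injEq, and_true]
      ring
    · rw [if_neg he, ih]
      have hodd : n % 2 = 1 := by
        by_contra h
        exact he ((PySem.Int.mod_eq_zero_iff_dvd _ _).mpr (by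
          have : (2:Nat) ∣ n := by omega
          exact_mod_cast this))
      unfold EvenNumber_alt
      rw [hb n, hb (n+1)]
      congr 2
      omega

theorem pyRange_nonpos (b : Int) (h : b ≤ 0) : PySem.List.pyRange 0 b 1 = [] := by
  simp [PySem.List.pyRange]; omega

-- ===== VERDICT (by name: the statement is the Claim_ definition above) =====
theorem EvenNumber_spec : Claim_equal_EvenNumber := by
  intro num _
  unfold Spec_EvenNumber
  by_cases h : num ≤ 0
  · unfold EvenNumber EvenNumber_alt
    have hb : PySem.Int.floordiv (num + 1) 2 ≤ 0 := by
      have := (PySem.Int.floordiv_lt_iff_lt_mul (a := num + 1) (b := 2) (q := 1) (by omega)).mpr (by omega)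
      omega
    rw [pyRange_nonpos num h, pyRange_nonpos _ hb]
    rfl
  · obtain ⟨n, rfl⟩ : ∃ n : Nat, num = (n : Int) := ⟨num.toNat, by omega⟩
    exact EvenNumber_key n
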